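-- pv_equiv track=rewrite | github.com/Kinexity/tikr_analiza_pomiarow | tikr_analiza_pomiarow.py | find_keys_with_extreme_maximal_values
-- ===== SOURCE A (Python) =====
-- def find_keys_with_extreme_maximal_values(data):
--     max_value = float('-inf')
--     min_value = float('inf')
--     max_key = None
--     min_key = None
--
--     for key, value in data.items():
--         max_val = max(value)
--
--         if max_val > max_value:
--             max_key = key
--             max_value = max_val
--
--         if max_val < min_value:
--             min_key = key
--             min_value = max_val
--
--     return max_key, min_key
-- ===== SOURCE B (Python) =====
-- def find_keys_with_extreme_maximal_values(data):
--     if not data: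
--         return None, None
--     m = {k: max(v) for k, v in data.items()}
--     return max(m, key=m.get), min(m, key=m.get)
-- ===== Notes on version B (the rewrite author's own statement) =====
-- stated objective: idiomatic
-- what changed: A's single fused loop with +/-inf sentinels and four running variables is replaced by a dict comprehension of per-key maxima followed by two selection passes max(m, key=m.get) / min(m, key=m.get), relying on max/min returning the first extremal key.
import Mathlib
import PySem

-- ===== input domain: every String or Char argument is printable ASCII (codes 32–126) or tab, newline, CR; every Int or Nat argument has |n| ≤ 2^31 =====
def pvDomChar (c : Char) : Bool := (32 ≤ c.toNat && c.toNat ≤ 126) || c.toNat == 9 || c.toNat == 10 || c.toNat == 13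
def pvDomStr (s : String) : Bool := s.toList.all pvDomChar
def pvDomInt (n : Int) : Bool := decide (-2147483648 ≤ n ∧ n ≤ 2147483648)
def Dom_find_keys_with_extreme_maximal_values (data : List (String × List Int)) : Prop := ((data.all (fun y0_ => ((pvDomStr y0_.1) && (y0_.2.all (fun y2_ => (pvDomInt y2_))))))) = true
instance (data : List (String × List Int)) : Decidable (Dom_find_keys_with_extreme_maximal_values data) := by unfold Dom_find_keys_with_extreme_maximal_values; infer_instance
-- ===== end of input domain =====

-- B replaces A's fused running-extreme loop by a table of per-key maxima plus two
-- first-extremal selection passes (idiomatic max/min with a key); same cost.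

-- ===== PORT A =====
-- A's float('-inf')/float('inf') sentinels with max_key/min_key = None are ported as
-- Option (key, value) state: 'none' = no item seen yet (the sentinel always loses then).
-- max(value) is PySem.List.max?; its 'none' case (empty list = ValueError) is excluded
-- by Pre_, '.getD 0' only makes the port total there.
def goA_find : List (String × List Int) → Option (String × Int) → Option (String × Int) → Option String × Option String
  | [], mx, mn => (mx.map Prod.fst, mn.map Prod.fst)
  | (k, v) :: rest, mx, mn =>
      let mv := (PySem.List.max? v (fun y => y)).getD 0
      goA_find rest
        (match mx with
         | none => some (k, mv)
         | some m => if m.2 < mv then some (k, mv) else some m)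
        (match mn with
         | none => some (k, mv)
         | some m => if mv < m.2 then some (k, mv) else some m)

def find_keys_with_extreme_maximal_values (data : List (String × List Int)) : Option String × Option String :=
  goA_find data none none

-- ===== PORT B =====
-- The dict comprehension {k: max(v) for k, v in data.items()} over a dict (unique keys)
-- is the association list data.map (k, max v); max(m, key=m.get) / min(m, key=m.get)
-- iterate the keys with the stored value as key function = PySem.List.max?/min? over the
-- items with key Prod.snd (first extremal element, exactly Python's rule).
def find_keys_with_extreme_maximal_values_alt (data : List (String × List Int)) : Option String × Option String :=
  if data = [] then (none, none)
  else
    let m := data.map (fun p => (p.1, (PySem.List.max? p.2 (fun y => y)).getD 0))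
    ((PySem.List.max? m (fun q => q.2)).map Prod.fst,
     (PySem.List.min? m (fun q => q.2)).map Prod.fst)

-- ===== PRECONDITION & SPEC =====
-- Pre_ excludes inputs containing an empty value list: there Python's max([]) raises ValueError in A (and in B).
def Pre_find_keys_with_extreme_maximal_values (data : List (String × List Int)) : Prop :=
  ∀ p ∈ data, p.2 ≠ []
instance (data : List (String × List Int)) : Decidable (Pre_find_keys_with_extreme_maximal_values data) := by unfold Pre_find_keys_with_extreme_maximal_values; infer_instance
def pvWitness_find_keys_with_extreme_maximal_values : (List (String × List Int)) := [("a", [1, 3]), ("b", [2])]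

def Spec_find_keys_with_extreme_maximal_values (data : List (String × List Int)) (out : Option String × Option String) : Prop := out = find_keys_with_extreme_maximal_values_alt data
instance (data : List (String × List Int)) (out : Option String × Option String) : Decidable (Spec_find_keys_with_extreme_maximal_values data out) := by unfold Spec_find_keys_with_extreme_maximal_values; infer_instance

-- ===== CLAIM (what is proved, stated in full; the proofs are below) =====
def Claim_equal_find_keys_with_extreme_maximal_values : Prop := ∀ (data : List (String × List Int)), Dom_find_keys_with_extreme_maximal_values data → Pre_find_keys_with_extreme_maximal_values data → Spec_find_keys_with_extreme_maximal_values data (find_keys_with_extreme_maximal_values data)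

-- ===== LEMMAS AND PROOFS =====

-- A's fused loop is the pair of the two independent first-wins folds over the per-key maxima.
theorem goA_find_eq (data : List (String × List Int)) :
    ∀ (mx mn : Option (String × Int)),
      goA_find data mx mn =
        (((data.map (fun p => (p.1, (PySem.List.max? p.2 (fun y => y)).getD 0))).foldl
            (fun acc x => match acc with
              | none => some x
              | some m => if m.2 < x.2 then some x else some m) mx).map Prod.fst,
         ((data.map (fun p => (p.1, (PySem.List.max? p.2 (fun y => y)).getD 0))).foldl
            (fun acc x => match acc with
              | none => some x
              | some m => if x.2 < m.2 then some x else some m) mn).map Prod.fst) := by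
  induction data with
  | nil => intro mx mn; rfl
  | cons hd tl ih =>
      intro mx mn
      obtain ⟨k, v⟩ := hd
      simp only [goA_find, List.map_cons, List.foldl_cons]
      exact ih _ _

-- max(m, key=m.get) over the items of m is exactly the first-wins fold used in goA_find_eq.
theorem max?_snd_eq (m : List (String × Int)) :
    PySem.List.max? m (fun q => q.2) =
      m.foldl (fun acc x => match acc with
        | none => some x
        | some mm => if mm.2 < x.2 then some x else some mm) none := by
  unfold PySem.List.max?
  congr 1
  funext acc x
  cases acc <;> rfl

theorem min?_snd_eq (m : List (String × Int)) :
    PySem.List.min? m (fun q => q.2) =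
      m.foldl (fun acc x => match acc with
        | none => some x
        | some mm => if x.2 < mm.2 then some x else some mm) none := by
  unfold PySem.List.min?
  congr 1
  funext acc x
  cases acc <;> rfl

-- ===== VERDICT (by name: the statement is the Claim_ definition above) =====
theorem find_keys_with_extreme_maximal_values_spec : Claim_equal_find_keys_with_extreme_maximal_values := by
  intro data _ _
  unfold Spec_find_keys_with_extreme_maximal_values
  unfold find_keys_with_extreme_maximal_values find_keys_with_extreme_maximal_values_alt
  cases data with
  | nil => rfl
  | cons hd tl =>
      rw [goA_find_eq, if_neg (List.cons_ne_nil hd tl)]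
      simp only [max?_snd_eq, min?_snd_eq]
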